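-- pv_equiv track=rewrite | github.com/arrowlimo/arrow-limo | scripts/import_scotia_cheque_register.py | assign_gl_code
-- ===== SOURCE A (Python) =====
-- GL_CODES = {
--     'payroll': '5210',  # Driver/Employee wages
--     'vehicle_lease': '5150',  # Heffner Auto lease payments
--     'vehicle_maintenance': '5120',  # Parrs Auto, Earls Auto, Kirks Tire
--     'rent': '5410',  # Fibrenew rent
--     'utilities': '5420',  # Fibrenew utilities, Telus
--     'insurance': '5310',  # Tredd Mayfair Insurance
--     'licensing': '5330',  # AGLC, licenses
--     'source_deductions': '2310',  # Revenue Canada payroll taxes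
--     'advertising': '5510',  # Action Pages, bridal shows
--     'donations': '5850',  # Word of Life donation
--     'bank_transfer': '1010',  # Arrow Limousine transfers
--     'unknown': '5850',  # Generic expense
-- }
--
-- def assign_gl_code(payee, description):
--     """Assign GL code based on payee and description patterns"""
--     payee_upper = payee.upper()
--     desc_upper = description.upper()
--
--     # Payroll employees
--     if any(name in payee_upper for name in ['ANGEL ESCOBAR', 'PAUL MANSELL', 'JEANNIE SHILLINGTON',
--                                               'DOUG REDMOND', 'DALE MENARD', 'MICHAEL RICHARD',
--                                               'JACK CARTER', 'ZAC KELLER', 'JESSE GORDON',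
--                                               'DUSTAN TOWNSEND', 'CHANTEL THOMAS', 'LOGAN MOSINSKY',
--                                               'MIKE WOODROW', 'KEVIN BOULLEY', 'SHAWN CALLIN']):
--         if 'PAYROLL' in desc_upper or 'LIEN' not in desc_upper:
--             return GL_CODES['payroll']
--
--     # Vehicle lease
--     if 'HEFFNER' in payee_upper or 'VIC PFIEFER' in payee_upper:
--         return GL_CODES['vehicle_lease']
--
--     # Vehicle maintenance
--     if any(vendor in payee_upper for vendor in ['PARRS', 'EARLS AUTO', 'KIRKS TIRE', 'MID ALTA']):
--         return GL_CODES['vehicle_maintenance']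
--
--     # Rent
--     if 'FIBRENEW' in payee_upper and 'UTILIT' not in desc_upper:
--         return GL_CODES['rent']
--
--     # Utilities
--     if 'FIBRENEW' in payee_upper and 'UTILIT' in desc_upper:
--         return GL_CODES['utilities']
--     if 'TELUS' in payee_upper:
--         return GL_CODES['utilities']
--
--     # Insurance
--     if 'TREDD MAYFAIR' in payee_upper or 'INSURANCE' in desc_upper:
--         return GL_CODES['insurance']
--
--     # Licensing
--     if 'AGLC' in payee_upper or 'LICENSE' in desc_upper:
--         return GL_CODES['licensing']
--
--     # Source deductions
--     if 'REVENUE CANADA' in payee_upper or 'SOURCE DEDUCTIONS' in desc_upper: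
--         return GL_CODES['source_deductions']
--
--     # Advertising
--     if 'ACTION PAGES' in payee_upper or 'BRIDAL SHOW' in desc_upper or 'WELCOME WAGON' in payee_upper:
--         return GL_CODES['advertising']
--
--     # Donations
--     if 'WORD OF LIFE' in payee_upper or 'DONATION' in desc_upper:
--         return GL_CODES['donations']
--
--     # Bank transfers
--     if 'ARROW LIMOUSINE' in payee_upper and 'TRANSFER' in desc_upper:
--         return GL_CODES['bank_transfer']
--
--     # Special case: Check 107 - lien holder payment (still payroll expense)
--     if 'KEVIN KOSIK' in payee_upper:
--         return GL_CODES['payroll']  # Payroll expense paid to lien holder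
--
--     return GL_CODES['unknown']
-- ===== SOURCE B (Python) =====
-- GL_CODES = {
--     'payroll': '5210',
--     'vehicle_lease': '5150',
--     'vehicle_maintenance': '5120',
--     'rent': '5410',
--     'utilities': '5420',
--     'insurance': '5310',
--     'licensing': '5330',
--     'source_deductions': '2310',
--     'advertising': '5510',
--     'donations': '5850',
--     'bank_transfer': '1010',
--     'unknown': '5850',
-- }
--
-- _PAYROLL_NAMES = ['ANGEL ESCOBAR', 'PAUL MANSELL', 'JEANNIE SHILLINGTON',
--                   'DOUG REDMOND', 'DALE MENARD', 'MICHAEL RICHARD',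
--                   'JACK CARTER', 'ZAC KELLER', 'JESSE GORDON',
--                   'DUSTAN TOWNSEND', 'CHANTEL THOMAS', 'LOGAN MOSINSKY',
--                   'MIKE WOODROW', 'KEVIN BOULLEY', 'SHAWN CALLIN']
--
-- # Keyword tables: (keywords, priority, gl code).  Lower priority = more
-- # specific classification.  Unlike a first-match chain, B collects EVERY
-- # matching classification as a (priority, code) candidate and then selects
-- # the best (minimum-priority) candidate with an accumulator.
-- _PAYEE_KEYWORDS = [
--     (['HEFFNER', 'VIC PFIEFER'], 1, '5150'),
--     (['PARRS', 'EARLS AUTO', 'KIRKS TIRE', 'MID ALTA'], 2, '5120'),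
--     (['TELUS'], 4, '5420'),
--     (['TREDD MAYFAIR'], 5, '5310'),
--     (['AGLC'], 6, '5330'),
--     (['REVENUE CANADA'], 7, '2310'),
--     (['ACTION PAGES', 'WELCOME WAGON'], 8, '5510'),
--     (['WORD OF LIFE'], 9, '5850'),
--     (['KEVIN KOSIK'], 11, '5210'),
-- ]
-- _DESC_KEYWORDS = [
--     (['INSURANCE'], 5, '5310'),
--     (['LICENSE'], 6, '5330'),
--     (['SOURCE DEDUCTIONS'], 7, '2310'),
--     (['BRIDAL SHOW'], 8, '5510'),
--     (['DONATION'], 9, '5850'),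
-- ]
--
--
-- def assign_gl_code(payee, description):
--     """Assign GL code based on payee and description patterns"""
--     p = payee.upper()
--     d = description.upper()
--     candidates = [(pri, code) for kws, pri, code in _PAYEE_KEYWORDS
--                   if any(kw in p for kw in kws)]
--     candidates += [(pri, code) for kws, pri, code in _DESC_KEYWORDS
--                    if any(kw in d for kw in kws)]
--     if any(name in p for name in _PAYROLL_NAMES) and ('PAYROLL' in d or 'LIEN' not in d):
--         candidates.append((0, '5210'))
--     if 'FIBRENEW' in p:
--         candidates.append((3, '5420' if 'UTILIT' in d else '5410'))
--     if 'ARROW LIMOUSINE' in p and 'TRANSFER' in d: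
--         candidates.append((10, '1010'))
--     best = (99, GL_CODES['unknown'])
--     for cand in candidates:
--         if cand[0] < best[0]:
--             best = cand
--     return best[1]
-- ===== Notes on version B (the rewrite author's own statement) =====
-- stated objective: alternative
-- what changed: Instead of A's first-match chain of 13 if-statements that returns at the first hit, B collects EVERY matching classification as a (priority, code) candidate from keyword tables plus three compound checks, then selects the minimum-priority candidate with a running-best accumulator.
import Mathlib
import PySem

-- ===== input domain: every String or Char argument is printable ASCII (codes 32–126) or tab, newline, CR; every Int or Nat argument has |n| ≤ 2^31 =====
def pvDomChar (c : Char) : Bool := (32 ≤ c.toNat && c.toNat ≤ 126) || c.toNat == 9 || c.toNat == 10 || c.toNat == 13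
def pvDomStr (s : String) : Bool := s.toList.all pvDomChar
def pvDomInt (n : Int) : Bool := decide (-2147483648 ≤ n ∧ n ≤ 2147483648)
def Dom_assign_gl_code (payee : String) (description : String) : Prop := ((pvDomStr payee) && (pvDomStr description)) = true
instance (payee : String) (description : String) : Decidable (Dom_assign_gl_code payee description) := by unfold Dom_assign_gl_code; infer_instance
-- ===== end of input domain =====

-- B replaces A's first-match if-chain by a different algorithm: it collects
-- EVERY matching classification as a (priority, code) candidate from keyword
-- tables and then selects the minimum-priority candidate with an accumulator
-- (objective: alternative; same cost).

-- ===== PORT A =====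
def pvGlCodes : PySem.Dict String String := PySem.Dict.mk
  [("payroll", "5210"), ("vehicle_lease", "5150"), ("vehicle_maintenance", "5120"),
   ("rent", "5410"), ("utilities", "5420"), ("insurance", "5310"), ("licensing", "5330"),
   ("source_deductions", "2310"), ("advertising", "5510"), ("donations", "5850"),
   ("bank_transfer", "1010"), ("unknown", "5850")]

def assign_gl_code (payee : String) (description : String) : String :=
  let payee_upper := PySem.Str.upper payee
  let desc_upper := PySem.Str.upper description
  if ((["ANGEL ESCOBAR", "PAUL MANSELL", "JEANNIE SHILLINGTON", "DOUG REDMOND",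
        "DALE MENARD", "MICHAEL RICHARD", "JACK CARTER", "ZAC KELLER", "JESSE GORDON",
        "DUSTAN TOWNSEND", "CHANTEL THOMAS", "LOGAN MOSINSKY", "MIKE WOODROW",
        "KEVIN BOULLEY", "SHAWN CALLIN"].any
        (fun name => PySem.Str.isIn name payee_upper)) &&
      (PySem.Str.isIn "PAYROLL" desc_upper || !PySem.Str.isIn "LIEN" desc_upper)) then
    (pvGlCodes.getD "payroll" "")
  else if PySem.Str.isIn "HEFFNER" payee_upper || PySem.Str.isIn "VIC PFIEFER" payee_upper then
    (pvGlCodes.getD "vehicle_lease" "")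
  else if (["PARRS", "EARLS AUTO", "KIRKS TIRE", "MID ALTA"].any
            (fun vendor => PySem.Str.isIn vendor payee_upper)) then
    (pvGlCodes.getD "vehicle_maintenance" "")
  else if PySem.Str.isIn "FIBRENEW" payee_upper && !PySem.Str.isIn "UTILIT" desc_upper then
    (pvGlCodes.getD "rent" "")
  else if PySem.Str.isIn "FIBRENEW" payee_upper && PySem.Str.isIn "UTILIT" desc_upper then
    (pvGlCodes.getD "utilities" "")
  else if PySem.Str.isIn "TELUS" payee_upper then
    (pvGlCodes.getD "utilities" "")
  else if PySem.Str.isIn "TREDD MAYFAIR" payee_upper || PySem.Str.isIn "INSURANCE" desc_upper then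
    (pvGlCodes.getD "insurance" "")
  else if PySem.Str.isIn "AGLC" payee_upper || PySem.Str.isIn "LICENSE" desc_upper then
    (pvGlCodes.getD "licensing" "")
  else if PySem.Str.isIn "REVENUE CANADA" payee_upper || PySem.Str.isIn "SOURCE DEDUCTIONS" desc_upper then
    (pvGlCodes.getD "source_deductions" "")
  else if PySem.Str.isIn "ACTION PAGES" payee_upper || PySem.Str.isIn "BRIDAL SHOW" desc_upper
          || PySem.Str.isIn "WELCOME WAGON" payee_upper then
    (pvGlCodes.getD "advertising" "")
  else if PySem.Str.isIn "WORD OF LIFE" payee_upper || PySem.Str.isIn "DONATION" desc_upper then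
    (pvGlCodes.getD "donations" "")
  else if PySem.Str.isIn "ARROW LIMOUSINE" payee_upper && PySem.Str.isIn "TRANSFER" desc_upper then
    (pvGlCodes.getD "bank_transfer" "")
  else if PySem.Str.isIn "KEVIN KOSIK" payee_upper then
    (pvGlCodes.getD "payroll" "")
  else
    (pvGlCodes.getD "unknown" "")

-- ===== PORT B =====
def pvPayrollNames : List String :=
  ["ANGEL ESCOBAR", "PAUL MANSELL", "JEANNIE SHILLINGTON", "DOUG REDMOND",
   "DALE MENARD", "MICHAEL RICHARD", "JACK CARTER", "ZAC KELLER", "JESSE GORDON",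
   "DUSTAN TOWNSEND", "CHANTEL THOMAS", "LOGAN MOSINSKY", "MIKE WOODROW",
   "KEVIN BOULLEY", "SHAWN CALLIN"]

-- (keywords, priority, code): lower priority = more specific classification
def pvPayeeKw : List (List String × Nat × String) :=
  [(["HEFFNER", "VIC PFIEFER"], 1, "5150"),
   (["PARRS", "EARLS AUTO", "KIRKS TIRE", "MID ALTA"], 2, "5120"),
   (["TELUS"], 4, "5420"),
   (["TREDD MAYFAIR"], 5, "5310"),
   (["AGLC"], 6, "5330"),
   (["REVENUE CANADA"], 7, "2310"),
   (["ACTION PAGES", "WELCOME WAGON"], 8, "5510"),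
   (["WORD OF LIFE"], 9, "5850"),
   (["KEVIN KOSIK"], 11, "5210")]

def pvDescKw : List (List String × Nat × String) :=
  [(["INSURANCE"], 5, "5310"),
   (["LICENSE"], 6, "5330"),
   (["SOURCE DEDUCTIONS"], 7, "2310"),
   (["BRIDAL SHOW"], 8, "5510"),
   (["DONATION"], 9, "5850")]

-- the 'candidates' list built in assign_gl_code (B)
def pvCands (p d : String) : List (Nat × String) :=
  ((pvPayeeKw.filter (fun r => r.1.any (fun kw => PySem.Str.isIn kw p))).map (fun r => r.2))
  ++ ((pvDescKw.filter (fun r => r.1.any (fun kw => PySem.Str.isIn kw d))).map (fun r => r.2))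
  ++ (if pvPayrollNames.any (fun name => PySem.Str.isIn name p) &&
        (PySem.Str.isIn "PAYROLL" d || !PySem.Str.isIn "LIEN" d) then [(0, "5210")] else [])
  ++ (if PySem.Str.isIn "FIBRENEW" p then
        [(3, if PySem.Str.isIn "UTILIT" d then "5420" else "5410")] else [])
  ++ (if PySem.Str.isIn "ARROW LIMOUSINE" p && PySem.Str.isIn "TRANSFER" d then
        [(10, "1010")] else [])

def assign_gl_code_alt (payee : String) (description : String) : String :=
  let p := PySem.Str.upper payee
  let d := PySem.Str.upper description
  ((pvCands p d).foldl (fun best cand => if cand.1 < best.1 then cand else best)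
      (99, pvGlCodes.getD "unknown" "")).2

-- ===== PRECONDITION & SPEC =====
def Spec_assign_gl_code (payee : String) (description : String) (out : String) : Prop := out = assign_gl_code_alt payee description
instance (payee : String) (description : String) (out : String) : Decidable (Spec_assign_gl_code payee description out) := by unfold Spec_assign_gl_code; infer_instance

-- ===== CLAIM (what is proved, stated in full; the proofs are below) =====
def Claim_equal_assign_gl_code : Prop := ∀ (payee : String) (description : String), Dom_assign_gl_code payee description → Spec_assign_gl_code payee description (assign_gl_code payee description)

-- ===== LEMMAS AND PROOFS =====

-- code associated with each priority level (3 = FIBRENEW depends on UTILIT)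
def pvCodeOf (u : Bool) : Nat → String
  | 0 => "5210" | 1 => "5150" | 2 => "5120"
  | 3 => if u then "5420" else "5410"
  | 4 => "5420" | 5 => "5310" | 6 => "5330" | 7 => "2310"
  | 8 => "5510" | 9 => "5850" | 10 => "1010" | 11 => "5210"
  | _ => "5850"

theorem pv_fold_snd (u : Bool) : ∀ (l : List (Nat × String)) (b : Nat × String),
    b.2 = pvCodeOf u b.1 → (∀ c ∈ l, c.2 = pvCodeOf u c.1) →
    (l.foldl (fun best cand => if cand.1 < best.1 then cand else best) b).2
      = pvCodeOf u ((l.foldl (fun best cand => if cand.1 < best.1 then cand else best) b).1)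
  | [], _, hb, _ => hb
  | c :: t, b, hb, hl => by
      simp only [List.foldl_cons]
      refine pv_fold_snd u t _ ?_ (fun c' hc' => hl c' (List.mem_cons_of_mem _ hc'))
      split
      · exact hl c List.mem_cons_self
      · exact hb

theorem pv_fold_le_init : ∀ (l : List (Nat × String)) (b : Nat × String),
    (l.foldl (fun best cand => if cand.1 < best.1 then cand else best) b).1 ≤ b.1
  | [], _ => le_refl _
  | c :: t, b => by
      simp only [List.foldl_cons]
      refine le_trans (pv_fold_le_init t _) ?_
      split <;> omega

theorem pv_fold_le_mem : ∀ (l : List (Nat × String)) (b c : Nat × String), c ∈ l →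
    (l.foldl (fun best cand => if cand.1 < best.1 then cand else best) b).1 ≤ c.1
  | c' :: t, b, c, h => by
      simp only [List.foldl_cons]
      rcases List.mem_cons.mp h with rfl | h
      · refine le_trans (pv_fold_le_init t _) ?_
        split <;> omega
      · exact pv_fold_le_mem t _ c h

theorem pv_fold_lb : ∀ (l : List (Nat × String)) (b : Nat × String) (k : Nat),
    k ≤ b.1 → (∀ c ∈ l, k ≤ c.1) →
    k ≤ (l.foldl (fun best cand => if cand.1 < best.1 then cand else best) b).1
  | [], _, _, hb, _ => hb
  | c :: t, b, k, hb, hl => by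
      simp only [List.foldl_cons]
      refine pv_fold_lb t _ k ?_ (fun c' hc' => hl c' (List.mem_cons_of_mem _ hc'))
      have := hl c List.mem_cons_self
      split <;> omega

theorem pv_seg_cons_append {α : Type} (b : Bool) (x : α) (l1 l2 : List α) :
    (if b = true then x :: (l1 ++ l2) else l1 ++ l2)
      = (if b = true then [x] else []) ++ (l1 ++ l2) := by
  cases b <;> simp

theorem pv_seg_cons_ite {α : Type} (b b' : Bool) (x y : α) :
    (if b = true then x :: (if b' = true then [y] else []) else (if b' = true then [y] else []))
      = (if b = true then [x] else []) ++ (if b' = true then [y] else []) := by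
  cases b <;> simp

theorem pv_mem_seg {α : Type} {b : Bool} {x c : α} :
    (c ∈ if b = true then [x] else []) ↔ (b = true ∧ c = x) := by
  cases b <;> simp

set_option maxHeartbeats 1000000 in
theorem pv_mem_cands (p d : String) (c : Nat × String) :
    c ∈ pvCands p d ↔
      ((PySem.Str.isIn "HEFFNER" p || PySem.Str.isIn "VIC PFIEFER" p) = true ∧ c = (1, "5150")) ∨
      ((PySem.Str.isIn "PARRS" p || (PySem.Str.isIn "EARLS AUTO" p || (PySem.Str.isIn "KIRKS TIRE" p || PySem.Str.isIn "MID ALTA" p))) = true ∧ c = (2, "5120")) ∨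
      (PySem.Str.isIn "TELUS" p = true ∧ c = (4, "5420")) ∨
      (PySem.Str.isIn "TREDD MAYFAIR" p = true ∧ c = (5, "5310")) ∨
      (PySem.Str.isIn "AGLC" p = true ∧ c = (6, "5330")) ∨
      (PySem.Str.isIn "REVENUE CANADA" p = true ∧ c = (7, "2310")) ∨
      ((PySem.Str.isIn "ACTION PAGES" p || PySem.Str.isIn "WELCOME WAGON" p) = true ∧ c = (8, "5510")) ∨
      (PySem.Str.isIn "WORD OF LIFE" p = true ∧ c = (9, "5850")) ∨
      (PySem.Str.isIn "KEVIN KOSIK" p = true ∧ c = (11, "5210")) ∨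
      (PySem.Str.isIn "INSURANCE" d = true ∧ c = (5, "5310")) ∨
      (PySem.Str.isIn "LICENSE" d = true ∧ c = (6, "5330")) ∨
      (PySem.Str.isIn "SOURCE DEDUCTIONS" d = true ∧ c = (7, "2310")) ∨
      (PySem.Str.isIn "BRIDAL SHOW" d = true ∧ c = (8, "5510")) ∨
      (PySem.Str.isIn "DONATION" d = true ∧ c = (9, "5850")) ∨
      ((List.any ["ANGEL ESCOBAR", "PAUL MANSELL", "JEANNIE SHILLINGTON", "DOUG REDMOND",
          "DALE MENARD", "MICHAEL RICHARD", "JACK CARTER", "ZAC KELLER", "JESSE GORDON",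
          "DUSTAN TOWNSEND", "CHANTEL THOMAS", "LOGAN MOSINSKY", "MIKE WOODROW",
          "KEVIN BOULLEY", "SHAWN CALLIN"] (fun name => PySem.Str.isIn name p) &&
        (PySem.Str.isIn "PAYROLL" d || !PySem.Str.isIn "LIEN" d)) = true ∧ c = (0, "5210")) ∨
      (PySem.Str.isIn "FIBRENEW" p = true ∧ c = (3, if PySem.Str.isIn "UTILIT" d then "5420" else "5410")) ∨
      ((PySem.Str.isIn "ARROW LIMOUSINE" p && PySem.Str.isIn "TRANSFER" d) = true ∧ c = (10, "1010")) := by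
  simp only [pvCands, pvPayeeKw, pvDescKw, pvPayrollNames, List.filter_cons, List.filter_nil,
    List.any_cons, List.any_nil, Bool.or_false, pv_seg_cons_ite, pv_seg_cons_append,
    List.map_append, apply_ite (f := List.map (fun r : List String × Nat × String => r.2)),
    List.map_cons, List.map_nil, List.mem_append, pv_mem_seg]
  simp only [or_assoc]




theorem pv_and_not_left {a b : Bool} (h : ¬ a = true) : ¬ ((a && b) = true) := by simp_all
theorem pv_fib_rent_neg {a b : Bool} (ha : a = true) (hb : b = true) : ¬ ((a && !b) = true) := by simp_all
theorem pv_fib_util_pos {a b : Bool} (ha : a = true) (hb : b = true) : (a && b) = true := by simp_all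
theorem pv_fib_rent_pos {a b : Bool} (ha : a = true) (hb : b = false) : (a && !b) = true := by simp_all

-- ===== VERDICT (by name: the statement is the Claim_ definition above) =====
set_option maxHeartbeats 4000000 in
theorem assign_gl_code_spec : Claim_equal_assign_gl_code := by
  intro payee description _
  unfold Spec_assign_gl_code
  simp only [assign_gl_code, assign_gl_code_alt]
  generalize PySem.Str.upper payee = p
  generalize PySem.Str.upper description = d
  rw [pv_fold_snd (PySem.Str.isIn "UTILIT" d) (pvCands p d) ((99:Nat), pvGlCodes.getD "unknown" "") rfl
    (fun c hc => by rcases (pv_mem_cands p d c).mp hc with ⟨h', rfl⟩|⟨h', rfl⟩|⟨h', rfl⟩|⟨h', rfl⟩|⟨h', rfl⟩|⟨h', rfl⟩|⟨h', rfl⟩|⟨h', rfl⟩|⟨h', rfl⟩|⟨h', rfl⟩|⟨h', rfl⟩|⟨h', rfl⟩|⟨h', rfl⟩|⟨h', rfl⟩|⟨h', rfl⟩|⟨h', rfl⟩|⟨h', rfl⟩ <;> rfl)]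
  by_cases h0 : (List.any ["ANGEL ESCOBAR", "PAUL MANSELL", "JEANNIE SHILLINGTON", "DOUG REDMOND",
        "DALE MENARD", "MICHAEL RICHARD", "JACK CARTER", "ZAC KELLER", "JESSE GORDON",
        "DUSTAN TOWNSEND", "CHANTEL THOMAS", "LOGAN MOSINSKY", "MIKE WOODROW",
        "KEVIN BOULLEY", "SHAWN CALLIN"] (fun name => PySem.Str.isIn name p) && (PySem.Str.isIn "PAYROLL" d || !PySem.Str.isIn "LIEN" d)) = true
  · have hm : ((0:Nat), "5210") ∈ pvCands p d :=
      (pv_mem_cands p d _).mpr (Or.inr (Or.inr (Or.inr (Or.inr (Or.inr (Or.inr (Or.inr (Or.inr (Or.inr (Or.inr (Or.inr (Or.inr (Or.inr (Or.inr (Or.inl ⟨h0, rfl⟩)))))))))))))))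
    have hub := pv_fold_le_mem (pvCands p d) ((99:Nat), pvGlCodes.getD "unknown" "") _ hm
    have hlb := pv_fold_lb (pvCands p d) ((99:Nat), pvGlCodes.getD "unknown" "") 0 (by simp)
      (fun c hc => by rcases (pv_mem_cands p d c).mp hc with ⟨h', rfl⟩|⟨h', rfl⟩|⟨h', rfl⟩|⟨h', rfl⟩|⟨h', rfl⟩|⟨h', rfl⟩|⟨h', rfl⟩|⟨h', rfl⟩|⟨h', rfl⟩|⟨h', rfl⟩|⟨h', rfl⟩|⟨h', rfl⟩|⟨h', rfl⟩|⟨h', rfl⟩|⟨h', rfl⟩|⟨h', rfl⟩|⟨h', rfl⟩ <;> simp_all)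
    rw [show ((pvCands p d).foldl (fun best cand => if cand.1 < best.1 then cand else best) ((99:Nat), pvGlCodes.getD "unknown" "")).1 = 0 by omega]
    rw [if_pos h0]
    rfl
  by_cases h1 : (PySem.Str.isIn "HEFFNER" p || PySem.Str.isIn "VIC PFIEFER" p) = true
  · have hm : ((1:Nat), "5150") ∈ pvCands p d :=
      (pv_mem_cands p d _).mpr (Or.inl ⟨h1, rfl⟩)
    have hub := pv_fold_le_mem (pvCands p d) ((99:Nat), pvGlCodes.getD "unknown" "") _ hm
    have hlb := pv_fold_lb (pvCands p d) ((99:Nat), pvGlCodes.getD "unknown" "") 1 (by simp)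
      (fun c hc => by rcases (pv_mem_cands p d c).mp hc with ⟨h', rfl⟩|⟨h', rfl⟩|⟨h', rfl⟩|⟨h', rfl⟩|⟨h', rfl⟩|⟨h', rfl⟩|⟨h', rfl⟩|⟨h', rfl⟩|⟨h', rfl⟩|⟨h', rfl⟩|⟨h', rfl⟩|⟨h', rfl⟩|⟨h', rfl⟩|⟨h', rfl⟩|⟨h', rfl⟩|⟨h', rfl⟩|⟨h', rfl⟩ <;> simp_all)
    rw [show ((pvCands p d).foldl (fun best cand => if cand.1 < best.1 then cand else best) ((99:Nat), pvGlCodes.getD "unknown" "")).1 = 1 by omega]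
    rw [if_neg h0, if_pos h1]
    rfl
  by_cases h2 : (List.any ["PARRS", "EARLS AUTO", "KIRKS TIRE", "MID ALTA"] (fun vendor => PySem.Str.isIn vendor p)) = true
  · have hm : ((2:Nat), "5120") ∈ pvCands p d :=
      (pv_mem_cands p d _).mpr (Or.inr (Or.inl ⟨(by simpa using h2), rfl⟩))
    have hub := pv_fold_le_mem (pvCands p d) ((99:Nat), pvGlCodes.getD "unknown" "") _ hm
    have hlb := pv_fold_lb (pvCands p d) ((99:Nat), pvGlCodes.getD "unknown" "") 2 (by simp)
      (fun c hc => by rcases (pv_mem_cands p d c).mp hc with ⟨h', rfl⟩|⟨h', rfl⟩|⟨h', rfl⟩|⟨h', rfl⟩|⟨h', rfl⟩|⟨h', rfl⟩|⟨h', rfl⟩|⟨h', rfl⟩|⟨h', rfl⟩|⟨h', rfl⟩|⟨h', rfl⟩|⟨h', rfl⟩|⟨h', rfl⟩|⟨h', rfl⟩|⟨h', rfl⟩|⟨h', rfl⟩|⟨h', rfl⟩ <;> simp_all)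
    rw [show ((pvCands p d).foldl (fun best cand => if cand.1 < best.1 then cand else best) ((99:Nat), pvGlCodes.getD "unknown" "")).1 = 2 by omega]
    rw [if_neg h0, if_neg h1, if_pos h2]
    rfl
  by_cases h3 : PySem.Str.isIn "FIBRENEW" p = true
  · have hm : ((3:Nat), if PySem.Str.isIn "UTILIT" d = true then "5420" else "5410") ∈ pvCands p d :=
      (pv_mem_cands p d _).mpr (Or.inr (Or.inr (Or.inr (Or.inr (Or.inr (Or.inr (Or.inr (Or.inr (Or.inr (Or.inr (Or.inr (Or.inr (Or.inr (Or.inr (Or.inr (Or.inl ⟨h3, rfl⟩))))))))))))))))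
    have hub := pv_fold_le_mem (pvCands p d) ((99:Nat), pvGlCodes.getD "unknown" "") _ hm
    have hlb := pv_fold_lb (pvCands p d) ((99:Nat), pvGlCodes.getD "unknown" "") 3 (by simp)
      (fun c hc => by rcases (pv_mem_cands p d c).mp hc with ⟨h', rfl⟩|⟨h', rfl⟩|⟨h', rfl⟩|⟨h', rfl⟩|⟨h', rfl⟩|⟨h', rfl⟩|⟨h', rfl⟩|⟨h', rfl⟩|⟨h', rfl⟩|⟨h', rfl⟩|⟨h', rfl⟩|⟨h', rfl⟩|⟨h', rfl⟩|⟨h', rfl⟩|⟨h', rfl⟩|⟨h', rfl⟩|⟨h', rfl⟩ <;> simp_all)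
    rw [show ((pvCands p d).foldl (fun best cand => if cand.1 < best.1 then cand else best) ((99:Nat), pvGlCodes.getD "unknown" "")).1 = 3 by omega]
    by_cases hu : PySem.Str.isIn "UTILIT" d = true
    · rw [if_neg h0, if_neg h1, if_neg h2, if_neg (pv_fib_rent_neg h3 hu), if_pos (pv_fib_util_pos h3 hu), hu]
      rfl
    · have hu2 : PySem.Str.isIn "UTILIT" d = false := Bool.eq_false_iff.mpr hu
      rw [if_neg h0, if_neg h1, if_neg h2, if_pos (pv_fib_rent_pos h3 hu2), hu2]
      rfl
  by_cases h4 : PySem.Str.isIn "TELUS" p = true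
  · have hm : ((4:Nat), "5420") ∈ pvCands p d :=
      (pv_mem_cands p d _).mpr (Or.inr (Or.inr (Or.inl ⟨h4, rfl⟩)))
    have hub := pv_fold_le_mem (pvCands p d) ((99:Nat), pvGlCodes.getD "unknown" "") _ hm
    have hlb := pv_fold_lb (pvCands p d) ((99:Nat), pvGlCodes.getD "unknown" "") 4 (by simp)
      (fun c hc => by rcases (pv_mem_cands p d c).mp hc with ⟨h', rfl⟩|⟨h', rfl⟩|⟨h', rfl⟩|⟨h', rfl⟩|⟨h', rfl⟩|⟨h', rfl⟩|⟨h', rfl⟩|⟨h', rfl⟩|⟨h', rfl⟩|⟨h', rfl⟩|⟨h', rfl⟩|⟨h', rfl⟩|⟨h', rfl⟩|⟨h', rfl⟩|⟨h', rfl⟩|⟨h', rfl⟩|⟨h', rfl⟩ <;> simp_all)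
    rw [show ((pvCands p d).foldl (fun best cand => if cand.1 < best.1 then cand else best) ((99:Nat), pvGlCodes.getD "unknown" "")).1 = 4 by omega]
    rw [if_neg h0, if_neg h1, if_neg h2, if_neg (pv_and_not_left h3), if_neg (pv_and_not_left h3), if_pos h4]
    rfl
  by_cases h5 : (PySem.Str.isIn "TREDD MAYFAIR" p || PySem.Str.isIn "INSURANCE" d) = true
  · have hm : ((5:Nat), "5310") ∈ pvCands p d := by
      rcases Bool.or_eq_true_iff.mp h5 with h' | h'
      · exact (pv_mem_cands p d _).mpr (Or.inr (Or.inr (Or.inr (Or.inl ⟨h', rfl⟩))))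
      · exact (pv_mem_cands p d _).mpr (Or.inr (Or.inr (Or.inr (Or.inr (Or.inr (Or.inr (Or.inr (Or.inr (Or.inr (Or.inl ⟨h', rfl⟩))))))))))
    have hub := pv_fold_le_mem (pvCands p d) ((99:Nat), pvGlCodes.getD "unknown" "") _ hm
    have hlb := pv_fold_lb (pvCands p d) ((99:Nat), pvGlCodes.getD "unknown" "") 5 (by simp)
      (fun c hc => by rcases (pv_mem_cands p d c).mp hc with ⟨h', rfl⟩|⟨h', rfl⟩|⟨h', rfl⟩|⟨h', rfl⟩|⟨h', rfl⟩|⟨h', rfl⟩|⟨h', rfl⟩|⟨h', rfl⟩|⟨h', rfl⟩|⟨h', rfl⟩|⟨h', rfl⟩|⟨h', rfl⟩|⟨h', rfl⟩|⟨h', rfl⟩|⟨h', rfl⟩|⟨h', rfl⟩|⟨h', rfl⟩ <;> simp_all)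
    rw [show ((pvCands p d).foldl (fun best cand => if cand.1 < best.1 then cand else best) ((99:Nat), pvGlCodes.getD "unknown" "")).1 = 5 by omega]
    rw [if_neg h0, if_neg h1, if_neg h2, if_neg (pv_and_not_left h3), if_neg (pv_and_not_left h3), if_neg h4, if_pos h5]
    rfl
  by_cases h6 : (PySem.Str.isIn "AGLC" p || PySem.Str.isIn "LICENSE" d) = true
  · have hm : ((6:Nat), "5330") ∈ pvCands p d := by
      rcases Bool.or_eq_true_iff.mp h6 with h' | h'
      · exact (pv_mem_cands p d _).mpr (Or.inr (Or.inr (Or.inr (Or.inr (Or.inl ⟨h', rfl⟩)))))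
      · exact (pv_mem_cands p d _).mpr (Or.inr (Or.inr (Or.inr (Or.inr (Or.inr (Or.inr (Or.inr (Or.inr (Or.inr (Or.inr (Or.inl ⟨h', rfl⟩)))))))))))
    have hub := pv_fold_le_mem (pvCands p d) ((99:Nat), pvGlCodes.getD "unknown" "") _ hm
    have hlb := pv_fold_lb (pvCands p d) ((99:Nat), pvGlCodes.getD "unknown" "") 6 (by simp)
      (fun c hc => by rcases (pv_mem_cands p d c).mp hc with ⟨h', rfl⟩|⟨h', rfl⟩|⟨h', rfl⟩|⟨h', rfl⟩|⟨h', rfl⟩|⟨h', rfl⟩|⟨h', rfl⟩|⟨h', rfl⟩|⟨h', rfl⟩|⟨h', rfl⟩|⟨h', rfl⟩|⟨h', rfl⟩|⟨h', rfl⟩|⟨h', rfl⟩|⟨h', rfl⟩|⟨h', rfl⟩|⟨h', rfl⟩ <;> simp_all)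
    rw [show ((pvCands p d).foldl (fun best cand => if cand.1 < best.1 then cand else best) ((99:Nat), pvGlCodes.getD "unknown" "")).1 = 6 by omega]
    rw [if_neg h0, if_neg h1, if_neg h2, if_neg (pv_and_not_left h3), if_neg (pv_and_not_left h3), if_neg h4, if_neg h5, if_pos h6]
    rfl
  by_cases h7 : (PySem.Str.isIn "REVENUE CANADA" p || PySem.Str.isIn "SOURCE DEDUCTIONS" d) = true
  · have hm : ((7:Nat), "2310") ∈ pvCands p d := by
      rcases Bool.or_eq_true_iff.mp h7 with h' | h'
      · exact (pv_mem_cands p d _).mpr (Or.inr (Or.inr (Or.inr (Or.inr (Or.inr (Or.inl ⟨h', rfl⟩))))))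
      · exact (pv_mem_cands p d _).mpr (Or.inr (Or.inr (Or.inr (Or.inr (Or.inr (Or.inr (Or.inr (Or.inr (Or.inr (Or.inr (Or.inr (Or.inl ⟨h', rfl⟩))))))))))))
    have hub := pv_fold_le_mem (pvCands p d) ((99:Nat), pvGlCodes.getD "unknown" "") _ hm
    have hlb := pv_fold_lb (pvCands p d) ((99:Nat), pvGlCodes.getD "unknown" "") 7 (by simp)
      (fun c hc => by rcases (pv_mem_cands p d c).mp hc with ⟨h', rfl⟩|⟨h', rfl⟩|⟨h', rfl⟩|⟨h', rfl⟩|⟨h', rfl⟩|⟨h', rfl⟩|⟨h', rfl⟩|⟨h', rfl⟩|⟨h', rfl⟩|⟨h', rfl⟩|⟨h', rfl⟩|⟨h', rfl⟩|⟨h', rfl⟩|⟨h', rfl⟩|⟨h', rfl⟩|⟨h', rfl⟩|⟨h', rfl⟩ <;> simp_all)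
    rw [show ((pvCands p d).foldl (fun best cand => if cand.1 < best.1 then cand else best) ((99:Nat), pvGlCodes.getD "unknown" "")).1 = 7 by omega]
    rw [if_neg h0, if_neg h1, if_neg h2, if_neg (pv_and_not_left h3), if_neg (pv_and_not_left h3), if_neg h4, if_neg h5, if_neg h6, if_pos h7]
    rfl
  by_cases h8 : (PySem.Str.isIn "ACTION PAGES" p || PySem.Str.isIn "BRIDAL SHOW" d || PySem.Str.isIn "WELCOME WAGON" p) = true
  · have hm : ((8:Nat), "5510") ∈ pvCands p d := by
      rcases Bool.or_eq_true_iff.mp h8 with h' | h'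
      · rcases Bool.or_eq_true_iff.mp h' with h'' | h''
        · exact (pv_mem_cands p d _).mpr (Or.inr (Or.inr (Or.inr (Or.inr (Or.inr (Or.inr (Or.inl ⟨by rw [h'']; rfl, rfl⟩)))))))
        · exact (pv_mem_cands p d _).mpr (Or.inr (Or.inr (Or.inr (Or.inr (Or.inr (Or.inr (Or.inr (Or.inr (Or.inr (Or.inr (Or.inr (Or.inr (Or.inl ⟨h'', rfl⟩)))))))))))))
      · exact (pv_mem_cands p d _).mpr (Or.inr (Or.inr (Or.inr (Or.inr (Or.inr (Or.inr (Or.inl ⟨by rw [h', Bool.or_true], rfl⟩)))))))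
    have hub := pv_fold_le_mem (pvCands p d) ((99:Nat), pvGlCodes.getD "unknown" "") _ hm
    have hlb := pv_fold_lb (pvCands p d) ((99:Nat), pvGlCodes.getD "unknown" "") 8 (by simp)
      (fun c hc => by rcases (pv_mem_cands p d c).mp hc with ⟨h', rfl⟩|⟨h', rfl⟩|⟨h', rfl⟩|⟨h', rfl⟩|⟨h', rfl⟩|⟨h', rfl⟩|⟨h', rfl⟩|⟨h', rfl⟩|⟨h', rfl⟩|⟨h', rfl⟩|⟨h', rfl⟩|⟨h', rfl⟩|⟨h', rfl⟩|⟨h', rfl⟩|⟨h', rfl⟩|⟨h', rfl⟩|⟨h', rfl⟩ <;> simp_all)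
    rw [show ((pvCands p d).foldl (fun best cand => if cand.1 < best.1 then cand else best) ((99:Nat), pvGlCodes.getD "unknown" "")).1 = 8 by omega]
    rw [if_neg h0, if_neg h1, if_neg h2, if_neg (pv_and_not_left h3), if_neg (pv_and_not_left h3), if_neg h4, if_neg h5, if_neg h6, if_neg h7, if_pos h8]
    rfl
  by_cases h9 : (PySem.Str.isIn "WORD OF LIFE" p || PySem.Str.isIn "DONATION" d) = true
  · have hm : ((9:Nat), "5850") ∈ pvCands p d := by
      rcases Bool.or_eq_true_iff.mp h9 with h' | h'
      · exact (pv_mem_cands p d _).mpr (Or.inr (Or.inr (Or.inr (Or.inr (Or.inr (Or.inr (Or.inr (Or.inl ⟨h', rfl⟩))))))))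
      · exact (pv_mem_cands p d _).mpr (Or.inr (Or.inr (Or.inr (Or.inr (Or.inr (Or.inr (Or.inr (Or.inr (Or.inr (Or.inr (Or.inr (Or.inr (Or.inr (Or.inl ⟨h', rfl⟩))))))))))))))
    have hub := pv_fold_le_mem (pvCands p d) ((99:Nat), pvGlCodes.getD "unknown" "") _ hm
    have hlb := pv_fold_lb (pvCands p d) ((99:Nat), pvGlCodes.getD "unknown" "") 9 (by simp)
      (fun c hc => by rcases (pv_mem_cands p d c).mp hc with ⟨h', rfl⟩|⟨h', rfl⟩|⟨h', rfl⟩|⟨h', rfl⟩|⟨h', rfl⟩|⟨h', rfl⟩|⟨h', rfl⟩|⟨h', rfl⟩|⟨h', rfl⟩|⟨h', rfl⟩|⟨h', rfl⟩|⟨h', rfl⟩|⟨h', rfl⟩|⟨h', rfl⟩|⟨h', rfl⟩|⟨h', rfl⟩|⟨h', rfl⟩ <;> simp_all)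
    rw [show ((pvCands p d).foldl (fun best cand => if cand.1 < best.1 then cand else best) ((99:Nat), pvGlCodes.getD "unknown" "")).1 = 9 by omega]
    rw [if_neg h0, if_neg h1, if_neg h2, if_neg (pv_and_not_left h3), if_neg (pv_and_not_left h3), if_neg h4, if_neg h5, if_neg h6, if_neg h7, if_neg h8, if_pos h9]
    rfl
  by_cases h10 : (PySem.Str.isIn "ARROW LIMOUSINE" p && PySem.Str.isIn "TRANSFER" d) = true
  · have hm : ((10:Nat), "1010") ∈ pvCands p d :=
      (pv_mem_cands p d _).mpr (Or.inr (Or.inr (Or.inr (Or.inr (Or.inr (Or.inr (Or.inr (Or.inr (Or.inr (Or.inr (Or.inr (Or.inr (Or.inr (Or.inr (Or.inr (Or.inr (⟨h10, rfl⟩)))))))))))))))))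
    have hub := pv_fold_le_mem (pvCands p d) ((99:Nat), pvGlCodes.getD "unknown" "") _ hm
    have hlb := pv_fold_lb (pvCands p d) ((99:Nat), pvGlCodes.getD "unknown" "") 10 (by simp)
      (fun c hc => by rcases (pv_mem_cands p d c).mp hc with ⟨h', rfl⟩|⟨h', rfl⟩|⟨h', rfl⟩|⟨h', rfl⟩|⟨h', rfl⟩|⟨h', rfl⟩|⟨h', rfl⟩|⟨h', rfl⟩|⟨h', rfl⟩|⟨h', rfl⟩|⟨h', rfl⟩|⟨h', rfl⟩|⟨h', rfl⟩|⟨h', rfl⟩|⟨h', rfl⟩|⟨h', rfl⟩|⟨h', rfl⟩ <;> simp_all)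
    rw [show ((pvCands p d).foldl (fun best cand => if cand.1 < best.1 then cand else best) ((99:Nat), pvGlCodes.getD "unknown" "")).1 = 10 by omega]
    rw [if_neg h0, if_neg h1, if_neg h2, if_neg (pv_and_not_left h3), if_neg (pv_and_not_left h3), if_neg h4, if_neg h5, if_neg h6, if_neg h7, if_neg h8, if_neg h9, if_pos h10]
    rfl
  by_cases h11 : PySem.Str.isIn "KEVIN KOSIK" p = true
  · have hm : ((11:Nat), "5210") ∈ pvCands p d :=
      (pv_mem_cands p d _).mpr (Or.inr (Or.inr (Or.inr (Or.inr (Or.inr (Or.inr (Or.inr (Or.inr (Or.inl ⟨h11, rfl⟩)))))))))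
    have hub := pv_fold_le_mem (pvCands p d) ((99:Nat), pvGlCodes.getD "unknown" "") _ hm
    have hlb := pv_fold_lb (pvCands p d) ((99:Nat), pvGlCodes.getD "unknown" "") 11 (by simp)
      (fun c hc => by rcases (pv_mem_cands p d c).mp hc with ⟨h', rfl⟩|⟨h', rfl⟩|⟨h', rfl⟩|⟨h', rfl⟩|⟨h', rfl⟩|⟨h', rfl⟩|⟨h', rfl⟩|⟨h', rfl⟩|⟨h', rfl⟩|⟨h', rfl⟩|⟨h', rfl⟩|⟨h', rfl⟩|⟨h', rfl⟩|⟨h', rfl⟩|⟨h', rfl⟩|⟨h', rfl⟩|⟨h', rfl⟩ <;> simp_all)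
    rw [show ((pvCands p d).foldl (fun best cand => if cand.1 < best.1 then cand else best) ((99:Nat), pvGlCodes.getD "unknown" "")).1 = 11 by omega]
    rw [if_neg h0, if_neg h1, if_neg h2, if_neg (pv_and_not_left h3), if_neg (pv_and_not_left h3), if_neg h4, if_neg h5, if_neg h6, if_neg h7, if_neg h8, if_neg h9, if_neg h10, if_pos h11]
    rfl
  have hub := pv_fold_le_init (pvCands p d) ((99:Nat), pvGlCodes.getD "unknown" "")
  have hlb := pv_fold_lb (pvCands p d) ((99:Nat), pvGlCodes.getD "unknown" "") 99 (by simp)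
    (fun c hc => by rcases (pv_mem_cands p d c).mp hc with ⟨h', rfl⟩|⟨h', rfl⟩|⟨h', rfl⟩|⟨h', rfl⟩|⟨h', rfl⟩|⟨h', rfl⟩|⟨h', rfl⟩|⟨h', rfl⟩|⟨h', rfl⟩|⟨h', rfl⟩|⟨h', rfl⟩|⟨h', rfl⟩|⟨h', rfl⟩|⟨h', rfl⟩|⟨h', rfl⟩|⟨h', rfl⟩|⟨h', rfl⟩ <;> simp_all)
  rw [show ((pvCands p d).foldl (fun best cand => if cand.1 < best.1 then cand else best) ((99:Nat), pvGlCodes.getD "unknown" "")).1 = 99 by omega]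
  rw [if_neg h0, if_neg h1, if_neg h2, if_neg (pv_and_not_left h3), if_neg (pv_and_not_left h3), if_neg h4, if_neg h5, if_neg h6, if_neg h7, if_neg h8, if_neg h9, if_neg h10, if_neg h11]
  rfl
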